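-- pv_equiv track=rewrite | github.com/Opsimathy/IT5003 | Finals/IT5003 24S1/IT5003 24S1 Final Code.py | buddySystem
-- ===== SOURCE A (Python) =====
-- from typing import List, Optional, Tuple
--
-- def buddySystem(L: List[int]) -> int:
--     s = 0
--     stack = []
--     for h in L:
--         while stack and stack[-1] >= h:
--             stack.pop()
--         if stack:
--             s += stack[-1]
--         stack.append(h)
--     return s
-- ===== SOURCE B (Python) =====
-- from typing import List
--
-- def buddySystem(L: List[int]) -> int:
--     # For each element, scan leftward for the nearest strictly smaller element;
--     # add it to the sum (or nothing if no strictly smaller element exists).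
--     s = 0
--     for i, x in enumerate(L):
--         j = i - 1
--         while j >= 0:
--             v = L[j]
--             if v < x:
--                 s += v
--                 break
--             j -= 1
--     return s
-- ===== Notes on version B (the rewrite author's own statement) =====
-- stated objective: alternative
-- what changed: Replaces the monotonic-stack single pass with a direct nested-loop scan: for each element, walk leftward to the first strictly smaller element; no stack is maintained.
import Mathlib
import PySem

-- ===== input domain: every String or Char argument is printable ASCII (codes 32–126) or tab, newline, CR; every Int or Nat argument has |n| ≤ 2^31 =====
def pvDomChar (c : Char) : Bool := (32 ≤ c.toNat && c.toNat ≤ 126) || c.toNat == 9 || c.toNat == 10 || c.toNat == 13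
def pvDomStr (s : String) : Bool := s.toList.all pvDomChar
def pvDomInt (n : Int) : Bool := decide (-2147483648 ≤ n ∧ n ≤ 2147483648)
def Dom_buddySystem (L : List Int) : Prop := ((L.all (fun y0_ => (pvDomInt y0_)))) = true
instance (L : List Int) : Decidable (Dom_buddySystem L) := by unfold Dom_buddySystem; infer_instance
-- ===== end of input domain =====

-- B replaces A's monotonic-stack single pass with a direct nested leftward scan for the
-- nearest strictly smaller element (alternative decomposition, not faster).


-- ===== PORT A =====
-- Python's `while stack and stack[-1] >= h: stack.pop()`; the stack is kept top-first
-- (Python's stack[-1] is the head here), which is the standard list transcription.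
def pvPopGE (stack : List Int) (h : Int) : List Int :=
  match stack with
  | [] => []
  | t :: rest => if t ≥ h then pvPopGE rest h else t :: rest

-- one iteration of A's `for h in L` body on the state (s, stack)
def pvStepA (st : Int × List Int) (h : Int) : Int × List Int :=
  let stk := pvPopGE st.2 h
  let s := st.1 + (match stk with | [] => 0 | t :: _ => t)  -- `if stack: s += stack[-1]`
  (s, h :: stk)                                             -- `stack.append(h)`

def buddySystem (L : List Int) : Int := (L.foldl pvStepA (0, [])).1

-- ===== PORT B =====
-- B's inner loop `for j in range(i-1, -1, -1)`: scan the reversed left prefix for the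
-- first element strictly smaller than x (0 contributed when none, as break never fires).
def pvScanLeft (rev : List Int) (x : Int) : Int :=
  match rev with
  | [] => 0
  | y :: ys => if y < x then y else pvScanLeft ys x

-- B's outer loop, carrying the reversed prefix of already-seen elements
def pvGoB (rev : List Int) (L : List Int) : Int :=
  match L with
  | [] => 0
  | h :: t => pvScanLeft rev h + pvGoB (h :: rev) t

def buddySystem_alt (L : List Int) : Int := pvGoB [] L

-- ===== PRECONDITION & SPEC =====
def Spec_buddySystem (L : List Int) (out : Int) : Prop := out = buddySystem_alt L
instance (L : List Int) (out : Int) : Decidable (Spec_buddySystem L out) := by unfold Spec_buddySystem; infer_instance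

-- ===== CLAIM (what is proved, stated in full; the proofs are below) =====
def Claim_equal_buddySystem : Prop := ∀ (L : List Int), Dom_buddySystem L → Spec_buddySystem L (buddySystem L)

-- ===== LEMMAS AND PROOFS =====

-- the head of the popped stack is exactly the first element < h of the stack
theorem pvPopGE_head (stack : List Int) (h : Int) :
    (match pvPopGE stack h with | [] => 0 | t :: _ => t) = pvScanLeft stack h := by
  induction stack with
  | nil => rfl
  | cons t rest ih =>
    simp only [pvPopGE, pvScanLeft]
    by_cases hc : t ≥ h
    · rw [if_pos hc, if_neg (by omega)]; exact ih
    · rw [if_neg hc, if_pos (by omega)]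

-- popping elements ≥ h does not change the first element < x, for any x ≤ h
theorem pvPopGE_scan (stack : List Int) (h x : Int) (hx : x ≤ h) :
    pvScanLeft (pvPopGE stack h) x = pvScanLeft stack x := by
  induction stack with
  | nil => rfl
  | cons t rest ih =>
    simp only [pvPopGE, pvScanLeft]
    by_cases hc : t ≥ h
    · rw [if_pos hc, if_neg (by omega)]; exact ih
    · rw [if_neg hc]; simp [pvScanLeft]

-- main invariant: if the stack answers every nearest-smaller query like the reversed
-- prefix does, A's fold from (s, stack) equals s plus B's scan-based sum
theorem pvFold_eq (L : List Int) : ∀ (s : Int) (stack rev : List Int),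
    (∀ x, pvScanLeft stack x = pvScanLeft rev x) →
    (L.foldl pvStepA (s, stack)).1 = s + pvGoB rev L := by
  induction L with
  | nil => intro s stack rev _; simp [pvGoB]
  | cons h t ih =>
    intro s stack rev hinv
    show ((t.foldl pvStepA (pvStepA (s, stack) h))).1 = _
    have hstep : pvStepA (s, stack) h
        = (s + pvScanLeft rev h, h :: pvPopGE stack h) := by
      simp only [pvStepA]
      rw [pvPopGE_head, hinv]
    rw [hstep, ih (s + pvScanLeft rev h) (h :: pvPopGE stack h) (h :: rev) ?_, pvGoB]
    · ring
    · intro x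
      simp only [pvScanLeft]
      by_cases hc : h < x
      · rw [if_pos hc, if_pos hc]
      · rw [if_neg hc, if_neg hc, pvPopGE_scan stack h x (by omega), hinv]

-- ===== VERDICT (by name: the statement is the Claim_ definition above) =====
theorem buddySystem_spec : Claim_equal_buddySystem := by
  intro L _
  show buddySystem L = buddySystem_alt L
  have := pvFold_eq L 0 [] [] (fun _ => rfl)
  simpa [buddySystem, buddySystem_alt] using this
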